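-- pv_equiv track=rewrite | github.com/cauasenna/PNT | Funções/At.2 - Funções.py | verifica_parenteses
-- ===== SOURCE A (Python) =====
-- def verifica_parenteses(sentenca, contador=0):
--     # Caso base: Se a string está vazia
--     if not sentenca:
--         return contador
--     # Incrementa se o primeiro caractere for '('
--     if sentenca[0] == '(':
--         return verifica_parenteses(sentenca[1:], contador + 1)
--     # Decrementa se o primeiro caractere for ')'
--     elif sentenca[0] == ')':
--         return verifica_parenteses(sentenca[1:], contador - 1)
--     # Continua verificando se o caractere não é parêntese
--     else:
--         return verifica_parenteses(sentenca[1:], contador)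
-- ===== SOURCE B (Python) =====
-- def verifica_parenteses(sentenca, contador=0):
--     return contador + sentenca.count('(') - sentenca.count(')')
-- ===== Notes on version B (the rewrite author's own statement) =====
-- stated objective: faster
-- what changed: Replaced the O(n^2) character-by-character recursion (each step copies the string tail with sentenca[1:]) by a closed-form expression using two C-level str.count calls.
import Mathlib
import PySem

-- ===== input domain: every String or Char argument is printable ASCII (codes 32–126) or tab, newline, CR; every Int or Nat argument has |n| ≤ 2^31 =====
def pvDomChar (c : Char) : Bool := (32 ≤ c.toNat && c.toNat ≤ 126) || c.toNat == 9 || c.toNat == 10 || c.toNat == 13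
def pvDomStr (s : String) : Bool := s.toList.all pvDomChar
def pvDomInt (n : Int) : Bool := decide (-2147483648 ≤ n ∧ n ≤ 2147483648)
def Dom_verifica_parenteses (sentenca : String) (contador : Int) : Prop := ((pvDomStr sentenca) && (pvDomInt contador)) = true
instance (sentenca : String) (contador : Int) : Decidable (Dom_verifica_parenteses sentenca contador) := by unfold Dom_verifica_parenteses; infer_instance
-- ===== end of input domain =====

-- B replaces A's per-character recursion (which re-slices the string each step) by a
-- closed form from two str.count calls; a timing run measured B faster.

-- ===== PORT A =====
-- A recurses on the string: sentenca[0] inspected, sentenca[1:] passed on; ported as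
-- structural recursion on the character list (tail = the [1:] slice).
def verifica_parenteses_go : List Char → Int → Int
  | [], contador => contador
  | ch :: rest, contador =>
    if ch == '(' then verifica_parenteses_go rest (contador + 1)
    else if ch == ')' then verifica_parenteses_go rest (contador - 1)
    else verifica_parenteses_go rest contador

def verifica_parenteses (sentenca : String) (contador : Int) : Int :=
  verifica_parenteses_go sentenca.toList contador

-- ===== PORT B =====
def verifica_parenteses_alt (sentenca : String) (contador : Int) : Int :=
  contador + (PySem.Str.count sentenca "(" : Int) - (PySem.Str.count sentenca ")" : Int)

-- ===== PRECONDITION & SPEC =====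
def Spec_verifica_parenteses (sentenca : String) (contador : Int) (out : Int) : Prop := out = verifica_parenteses_alt sentenca contador
instance (sentenca : String) (contador : Int) (out : Int) : Decidable (Spec_verifica_parenteses sentenca contador out) := by unfold Spec_verifica_parenteses; infer_instance

-- ===== CLAIM (what is proved, stated in full; the proofs are below) =====
def Claim_equal_verifica_parenteses : Prop := ∀ (sentenca : String) (contador : Int), Dom_verifica_parenteses sentenca contador → Spec_verifica_parenteses sentenca contador (verifica_parenteses sentenca contador)

-- ===== LEMMAS AND PROOFS =====

-- PySem.Chars.count with a one-character needle is List.count (fuel induction on count.go).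
theorem pv_count_go_singleton (c : Char) : ∀ (fuel : Nat) (l : List Char) (acc : Nat), l.length ≤ fuel →
    PySem.Chars.count.go [c] fuel l acc = acc + l.count c := by
  intro fuel
  induction fuel with
  | zero =>
    intro l acc h
    cases l with
    | nil => simp [PySem.Chars.count.go]
    | cons x xs => simp at h
  | succ n ih =>
    intro l acc h
    cases l with
    | nil => simp [PySem.Chars.count.go]
    | cons x xs =>
      rw [PySem.Chars.count.go]
      simp only [List.isPrefixOf, List.count_cons]
      by_cases hx : x = c
      · simp [hx, ih xs _ (by simpa using h)]
        omega
      · simp [hx, Ne.symm hx, ih xs _ (by simpa using h)]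

theorem pv_count_singleton (s : List Char) (c : Char) : PySem.Chars.count s [c] = s.count c := by
  simp [PySem.Chars.count, pv_count_go_singleton c s.length s 0 le_rfl]

-- A's recursion computes contador + #'(' - #')'.
theorem pv_go_eq (l : List Char) : ∀ (contador : Int),
    verifica_parenteses_go l contador = contador + (l.count '(' : Int) - (l.count ')' : Int) := by
  induction l with
  | nil => intro contador; simp [verifica_parenteses_go]
  | cons ch rest ih =>
    intro contador
    by_cases h1 : ch = '('
    · simp [verifica_parenteses_go, h1, ih, List.count_cons]
      omega
    · by_cases h2 : ch = ')'
      · simp [verifica_parenteses_go, h1, h2, ih, List.count_cons]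
        omega
      · simp [verifica_parenteses_go, h1, h2, ih, List.count_cons]

-- ===== VERDICT (by name: the statement is the Claim_ definition above) =====
theorem verifica_parenteses_spec : Claim_equal_verifica_parenteses := by
  intro sentenca contador _
  unfold Spec_verifica_parenteses verifica_parenteses verifica_parenteses_alt
  rw [pv_go_eq]
  simp [PySem.Str.count, pv_count_singleton]
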